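-- pv_equiv track=rewrite | github.com/Vulmatch/Vulmatch | extract_sig/struct_data_flow_analysis.py | extract_function_range
-- ===== SOURCE A (Python) =====
-- def extract_function_range(c_line_function,function):
--  lines=[]
--  for i in c_line_function:
--   if c_line_function[i]==function:
--    lines.append(i)
--  if len(lines)==0:
--    return None
--  return (lines[0],lines[-1])
-- ===== SOURCE B (Python) =====
-- def extract_function_range(c_line_function, function):
--     first = None
--     for k in c_line_function:
--         if c_line_function[k] == function:
--             first = k
--             break
--     if first is None:
--         return None
--     for k in reversed(c_line_function):
--         if c_line_function[k] == function:
--             return (first, k)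
-- ===== Notes on version B (the rewrite author's own statement) =====
-- stated objective: alternative
-- what changed: Replaces the single full scan that accumulates a list of all matching keys with two early-terminating directional scans (forward for the first matching key, reversed for the last), keeping no list.
import Mathlib
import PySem

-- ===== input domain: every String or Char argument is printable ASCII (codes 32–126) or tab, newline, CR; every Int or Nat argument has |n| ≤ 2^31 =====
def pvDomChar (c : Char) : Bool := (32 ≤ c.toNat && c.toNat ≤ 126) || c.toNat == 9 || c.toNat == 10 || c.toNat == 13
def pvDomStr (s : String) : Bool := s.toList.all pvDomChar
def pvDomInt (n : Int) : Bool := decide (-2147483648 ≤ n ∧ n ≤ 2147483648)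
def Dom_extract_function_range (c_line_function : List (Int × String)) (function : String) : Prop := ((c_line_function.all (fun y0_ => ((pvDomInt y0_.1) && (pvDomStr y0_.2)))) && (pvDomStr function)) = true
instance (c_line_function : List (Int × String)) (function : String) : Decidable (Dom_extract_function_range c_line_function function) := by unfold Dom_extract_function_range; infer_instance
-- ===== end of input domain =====

-- B replaces A's full accumulating scan with two early-exit directional scans (first key forward, last key backward); same cost, no list.


-- ===== PORT A =====
-- dict lookup c[k]: first match in the association list (exact for a dict, whose keys are unique)
def pyDictGet (c : List (Int × String)) (k : Int) : Option String :=
  match c with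
  | [] => none
  | (k', v) :: rest => if k' = k then some v else pyDictGet rest k

def extract_function_range (c_line_function : List (Int × String)) (function : String) : Option (Int × Int) :=
  -- lines = []; for i in dict: if dict[i] == function: lines.append(i)
  let lines := c_line_function.foldl
    (fun acc p => if pyDictGet c_line_function p.1 = some function then acc ++ [p.1] else acc) []
  match lines with
  | [] => none                                  -- len(lines) == 0
  | a :: rest => some (a, rest.getLastD a)      -- (lines[0], lines[-1])

-- ===== PORT B =====
-- first key (in the given traversal order) whose dict value equals f; early exit like B's `break`/`return`
def scanKey (full : List (Int × String)) (f : String) : List (Int × String) → Option Int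
  | [] => none
  | p :: rest => if pyDictGet full p.1 = some f then some p.1 else scanKey full f rest

def extract_function_range_alt (c_line_function : List (Int × String)) (function : String) : Option (Int × Int) :=
  match scanKey c_line_function function c_line_function with
  | none => none
  | some first =>
    (scanKey c_line_function function c_line_function.reverse).map (fun last => (first, last))

-- ===== PRECONDITION & SPEC =====
-- Pre_ excludes association lists with duplicate keys: they do not represent a Python dict
-- (dict construction collapses duplicates), so first-match lookup order there is accidental.
def Pre_extract_function_range (c_line_function : List (Int × String)) (function : String) : Prop :=
  (c_line_function.map Prod.fst).Nodup
instance (c_line_function : List (Int × String)) (function : String) : Decidable (Pre_extract_function_range c_line_function function) := by unfold Pre_extract_function_range; infer_instance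
def pvWitness_extract_function_range : (List (Int × String)) × String := ([(1, "f"), (2, "g"), (3, "f")], "f")

def Spec_extract_function_range (c_line_function : List (Int × String)) (function : String) (out : Option (Int × Int)) : Prop := out = extract_function_range_alt c_line_function function
instance (c_line_function : List (Int × String)) (function : String) (out : Option (Int × Int)) : Decidable (Spec_extract_function_range c_line_function function out) := by unfold Spec_extract_function_range; infer_instance

-- ===== CLAIM (what is proved, stated in full; the proofs are below) =====
def Claim_equal_extract_function_range : Prop := ∀ (c_line_function : List (Int × String)) (function : String), Dom_extract_function_range c_line_function function → Pre_extract_function_range c_line_function function → Spec_extract_function_range c_line_function function (extract_function_range c_line_function function)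

-- ===== LEMMAS AND PROOFS =====
theorem lines_foldl (c : List (Int × String)) (f : String) :
    ∀ (l : List (Int × String)) (acc : List Int),
      l.foldl (fun acc p => if pyDictGet c p.1 = some f then acc ++ [p.1] else acc) acc
        = acc ++ (l.filter (fun p => decide (pyDictGet c p.1 = some f))).map Prod.fst := by
  intro l
  induction l with
  | nil => simp
  | cons p rest ih =>
    intro acc
    by_cases h : pyDictGet c p.1 = some f <;> simp [List.foldl_cons, h, ih]

theorem scanKey_eq (full : List (Int × String)) (f : String) :
    ∀ (l : List (Int × String)),
      scanKey full f l
        = ((l.filter (fun p => decide (pyDictGet full p.1 = some f))).map Prod.fst).head? := by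
  intro l
  induction l with
  | nil => simp [scanKey]
  | cons p rest ih =>
    by_cases h : pyDictGet full p.1 = some f <;> simp [scanKey, h, ih]

theorem getLast?_cons_eq (rest : List Int) : ∀ (a : Int), (a :: rest).getLast? = some (rest.getLastD a) := by
  induction rest with
  | nil => intro a; rfl
  | cons b tl ih => intro a; rw [List.getLast?_cons_cons, ih b]; cases tl <;> rfl

theorem extract_function_range_spec : Claim_equal_extract_function_range := by
  intro c f _ _
  unfold Spec_extract_function_range extract_function_range extract_function_range_alt
  rw [lines_foldl c f c [], scanKey_eq, scanKey_eq, List.filter_reverse, List.map_reverse,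
    List.head?_reverse, List.nil_append]
  cases hF : (c.filter (fun p => decide (pyDictGet c p.1 = some f))).map Prod.fst with
  | nil => simp
  | cons a rest => simp [getLast?_cons_eq rest a]
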